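-- pv_equiv track=rewrite | github.com/wyk18703232953/myResearch | codeComplex/data/filteredData/python/cubic/python_cubic_0128.py | solve_one
-- ===== SOURCE A (Python) =====
-- def solve_one(S: str, t: str) -> str:
--     LENS = len(S)
--     LENT = len(t)
--     flag = 0
--
--     for i in range(1, LENT + 1):
--         t1 = t[:i]
--         t2 = t[i:]
--
--         DP = [-1] * (len(t1) + 1)
--         DP[0] = 0
--
--         for s in S:
--             for j in range(len(t1), -1, -1):
--                 if 0 <= DP[j] < len(t2) and s == t2[DP[j]]:
--                     DP[j] += 1
--
--                 if j > 0 and s == t1[j - 1]: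
--                     DP[j] = max(DP[j], DP[j - 1])
--
--         if DP[-1] == len(t2):
--             flag = 1
--             break
--
--     return "YES" if flag else "NO"
-- ===== SOURCE B (Python) =====
-- # Different algorithm: instead of scanning S once per split maintaining max
-- # suffix-progress per prefix-progress (A), B precomputes a next-occurrence
-- # table over S and runs, per split, a min-prefix DP: row[b] = shortest prefix
-- # of S that disjointly embeds t1[:a] and t2[:b]; answer YES iff some split's
-- # full table entry is <= len(S).
--
-- def _next_tbl(S, c, INF):
--     # nx[q] = 1 + (smallest p >= q with S[p] == c), else INF
--     nx = [INF] * (len(S) + 1)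
--     for q in range(len(S) - 1, -1, -1):
--         nx[q] = q + 1 if S[q] == c else nx[q + 1]
--     return nx
--
--
-- def solve_one(S: str, t: str) -> str:
--     n = len(t)
--     m = len(S)
--     INF = m + 1
--     tbl = {c: _next_tbl(S, c, INF) for c in set(t)}
--
--     def nxt(q, c):
--         return tbl[c][q] if q <= m else INF
--
--     for i in range(1, n + 1):
--         t1 = t[:i]
--         t2 = t[i:]
--         row = [0] + [INF] * (n - i)
--         for b in range(1, n - i + 1):
--             row[b] = nxt(row[b - 1], t2[b - 1])
--         for a in range(1, i + 1):
--             c = t1[a - 1]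
--             row[0] = nxt(row[0], c)
--             for b in range(1, n - i + 1):
--                 row[b] = min(nxt(row[b], c), nxt(row[b - 1], t2[b - 1]))
--         if row[-1] <= m:
--             return "YES"
--     return "NO"
-- ===== Notes on version B (the rewrite author's own statement) =====
-- stated objective: alternative
-- what changed: B replaces A's per-split scan of S (max suffix-progress per prefix-progress, updated in place per character) by a precomputed next-occurrence table over S and, per split, a min-prefix-length DP row[b] = shortest prefix of S disjointly embedding t1[:a] and t2[:b]; the DP never scans S.
import Mathlib
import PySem

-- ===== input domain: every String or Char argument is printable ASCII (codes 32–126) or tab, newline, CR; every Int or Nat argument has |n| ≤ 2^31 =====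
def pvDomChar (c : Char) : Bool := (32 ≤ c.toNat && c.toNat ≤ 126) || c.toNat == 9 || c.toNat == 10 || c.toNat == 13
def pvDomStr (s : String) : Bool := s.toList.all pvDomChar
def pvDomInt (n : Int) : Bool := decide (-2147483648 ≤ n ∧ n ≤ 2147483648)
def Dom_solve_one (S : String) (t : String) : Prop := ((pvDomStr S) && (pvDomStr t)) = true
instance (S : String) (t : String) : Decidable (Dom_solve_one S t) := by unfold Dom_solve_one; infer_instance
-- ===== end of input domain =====

-- B replaces A's per-split scan of S (max suffix-progress per prefix-progress, updated in
-- place per character of S) by a precomputed next-occurrence table over S and, per split,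
-- a min-prefix-length DP (row[b] = shortest prefix of S disjointly embedding t1[:a], t2[:b]);
-- the DP itself never scans S.  Same return value; alternative algorithm.

-- ===== PORT A =====

-- one body of A's inner 'for j' loop: reads DP[j], DP[j-1], writes DP[j]
def aStep (t1 t2 : List Char) (s : Char) (dp : List Int) (j : Nat) : List Int :=
  let dpj := (PySem.List.pyGet? dp (j : Int)).getD (-1)
  let dpj := if 0 ≤ dpj ∧ dpj < (t2.length : Int) ∧ PySem.List.pyGet? t2 dpj = some s
             then dpj + 1 else dpj
  let dpj := if 0 < j ∧ PySem.List.pyGet? t1 ((j : Int) - 1) = some s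
             then max dpj ((PySem.List.pyGet? dp ((j : Int) - 1)).getD (-1)) else dpj
  dp.set j dpj

-- 'for j in range(len(t1), -1, -1)': descending loop
def aJLoop (t1 t2 : List Char) (s : Char) : Nat → List Int → List Int
  | 0, dp => aStep t1 t2 s dp 0
  | j+1, dp => aJLoop t1 t2 s j (aStep t1 t2 s dp (j+1))

-- 'for s in S'
def aScan (t1 t2 : List Char) (Sl : List Char) (dp : List Int) : List Int :=
  Sl.foldl (fun dp s => aJLoop t1 t2 s t1.length dp) dp

-- body of the outer 'for i' loop: build t1, t2, DP, scan S, test DP[-1] == len(t2)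
def aCheck (Sl tl : List Char) (i : Int) : Bool :=
  let t1 := PySem.List.slice tl none (some i)
  let t2 := PySem.List.slice tl (some i) none
  let dp0 := (List.replicate (t1.length + 1) (-1 : Int)).set 0 0
  let dp := aScan t1 t2 Sl dp0
  decide (PySem.List.pyGet? dp (-1) = some (t2.length : Int))

-- 'for i in range(1, LENT+1): … flag = 1; break'
def aOuter (Sl tl : List Char) : List Int → Bool
  | [] => false
  | i :: rest => if aCheck Sl tl i then true else aOuter Sl tl rest

def solve_one (S : String) (t : String) : String :=
  let Sl := S.toList
  let tl := t.toList
  let LENT : Int := tl.length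
  if aOuter Sl tl (PySem.List.pyRange 1 (LENT + 1) 1) then "YES" else "NO"

-- ===== PORT B =====

-- Source B's _next_tbl: backward fill nx[q] = q+1 if S[q]==c else nx[q+1]; here the list for
-- absolute offset 'off' is built by recursion on the remaining suffix of S (same values,
-- filled back to front exactly as the Python loop does)
def bNextGo (c : Char) (inf : Int) : Nat → List Char → List Int
  | _, [] => [inf]
  | q, s :: rest =>
    let nx := bNextGo c inf (q+1) rest
    (if s = c then (q : Int) + 1 else nx.headD inf) :: nx

-- Source B's tbl = {c: _next_tbl(S, c, INF) for c in set(t)} (only ever looked up by key,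
-- so set iteration order is irrelevant)
def bTbl (Sl tl : List Char) (inf : Int) : PySem.Dict Char (List Int) :=
  (PySem.Set.ofList tl).foldl
    (fun d c => PySem.Dict.insert d c (bNextGo c inf 0 Sl)) PySem.Dict.empty

-- Source B's nxt(q, c) = tbl[c][q] if q <= m else INF (call sites only use c in t, so the
-- KeyError branch of tbl[c] is unreachable; getD [] is exact there)
def bNxt (tbl : PySem.Dict Char (List Int)) (m inf : Int) (q : Int) (c : Char) : Int :=
  if q ≤ m then PySem.List.pyGetD ((PySem.Dict.get? tbl c).getD []) q inf else inf

-- the initial row fill: for b in 1..: row[b] = nxt(row[b-1], t2[b-1])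
def bInitRow (nxt : Int → Char → Int) : Int → List Char → List Int
  | _, [] => []
  | prev, c :: cs => let v := nxt prev c; v :: bInitRow nxt v cs

-- inner 'for b' loop of the a-update: row[b] = min(nxt(row[b], c), nxt(row[b-1], t2[b-1]))
-- (row[b-1] already holds its new value, carried here as 'prev')
def bStepGo (nxt : Int → Char → Int) (c : Char) : Int → List (Char × Int) → List Int
  | _, [] => []
  | prev, (tc, old) :: rest =>
    let v := min (nxt old c) (nxt prev tc)
    v :: bStepGo nxt c v rest

-- one iteration of 'for a': row[0] = nxt(row[0], c), then the inner loop
def bStepRow (nxt : Int → Char → Int) (t2 : List Char) (c : Char) (row : List Int) : List Int :=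
  match row with
  | [] => []
  | r0 :: rest => let h := nxt r0 c; h :: bStepGo nxt c h (t2.zip rest)

-- one split: build the row, run the a-loop over t1, test row[-1] <= m
def bCheck (nxt : Int → Char → Int) (m : Int) (tl : List Char) (i : Int) : Bool :=
  let t1 := PySem.List.slice tl none (some i)
  let t2 := PySem.List.slice tl (some i) none
  let row : List Int := 0 :: bInitRow nxt 0 t2
  let row := t1.foldl (fun r c => bStepRow nxt t2 c r) row
  decide (PySem.List.pyGetD row (-1) (m + 2) ≤ m)

-- 'for i in range(1, n+1): … return "YES"'
def bOuter (nxt : Int → Char → Int) (m : Int) (tl : List Char) : List Int → Bool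
  | [] => false
  | i :: rest => if bCheck nxt m tl i then true else bOuter nxt m tl rest

def solve_one_alt (S : String) (t : String) : String :=
  let Sl := S.toList
  let tl := t.toList
  let n : Int := tl.length
  let m : Int := Sl.length
  let inf : Int := m + 1
  let tbl := bTbl Sl tl inf
  let nxt : Int → Char → Int := fun q c => bNxt tbl m inf q c
  if bOuter nxt m tl (PySem.List.pyRange 1 (n + 1) 1) then "YES" else "NO"

-- ===== PRECONDITION & SPEC =====
def Spec_solve_one (S : String) (t : String) (out : String) : Prop := out = solve_one_alt S t
instance (S : String) (t : String) (out : String) : Decidable (Spec_solve_one S t out) := by unfold Spec_solve_one; infer_instance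

-- ===== CLAIM (what is proved, stated in full; the proofs are below) =====
def Claim_equal_solve_one : Prop := ∀ (S : String) (t : String), Dom_solve_one S t → Spec_solve_one S t (solve_one S t)

-- ===== LEMMAS AND PROOFS =====


-- spec: disjoint embedding of t1 and t2 (interleaved) in P, by recursion on reversed lists
def embRev : List Char → List Char → List Char → Bool
  | t1r, t2r, [] => t1r.isEmpty && t2r.isEmpty
  | t1r, t2r, s :: Pr =>
      (match t1r with | a :: t1r' => a = s && embRev t1r' t2r Pr | [] => false)
      || (match t2r with | b :: t2r' => b = s && embRev t1r t2r' Pr | [] => false)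
      || embRev t1r t2r Pr

def Emb (t1 t2 P : List Char) : Bool := embRev t1.reverse t2.reverse P.reverse

theorem emb_nil_iff (t1 t2 : List Char) : Emb t1 t2 [] = true ↔ t1 = [] ∧ t2 = [] := by
  simp [Emb, embRev, List.isEmpty_iff]

theorem emb_nil_nil (P : List Char) : Emb [] [] P = true := by
  suffices h : ∀ Pr : List Char, embRev [] [] Pr = true by exact h P.reverse
  intro Pr
  induction Pr with
  | nil => rfl
  | cons s Pr ih => simp [embRev, ih]

theorem emb_snoc_iff (t1 t2 P : List Char) (s : Char) :
    Emb t1 t2 (P ++ [s]) = true ↔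
      (∃ u, t1 = u ++ [s] ∧ Emb u t2 P = true) ∨
      (∃ v, t2 = v ++ [s] ∧ Emb t1 v P = true) ∨
      Emb t1 t2 P = true := by
  unfold Emb
  rw [List.reverse_append]
  simp only [List.reverse_singleton, List.singleton_append]
  rw [embRev.eq_def]
  simp only []
  constructor
  · intro h
    rcases Bool.or_eq_true_iff.mp h with h | h
    · rcases Bool.or_eq_true_iff.mp h with h | h
      · rcases ht : t1.reverse with _ | ⟨a, w⟩
        · rw [ht] at h; simp at h
        · rw [ht] at h
          simp only [Bool.and_eq_true, decide_eq_true_eq] at h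
          refine Or.inl ⟨w.reverse, ?_, ?_⟩
          · rw [← t1.reverse_reverse, ht, h.1]; simp
          · simpa using h.2
      · rcases ht : t2.reverse with _ | ⟨a, w⟩
        · rw [ht] at h; simp at h
        · rw [ht] at h
          simp only [Bool.and_eq_true, decide_eq_true_eq] at h
          refine Or.inr (Or.inl ⟨w.reverse, ?_, ?_⟩)
          · rw [← t2.reverse_reverse, ht, h.1]; simp
          · simpa using h.2
    · exact Or.inr (Or.inr h)
  · intro h
    rcases h with ⟨u, rfl, hu⟩ | ⟨v, rfl, hv⟩ | h
    · apply Bool.or_eq_true_iff.mpr; left; apply Bool.or_eq_true_iff.mpr; left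
      simp [List.reverse_append, hu]
    · apply Bool.or_eq_true_iff.mpr; left; apply Bool.or_eq_true_iff.mpr; right
      simp [List.reverse_append, hv]
    · apply Bool.or_eq_true_iff.mpr; right; exact h

theorem emb_append (t1 t2 P Q : List Char) (h : Emb t1 t2 P = true) :
    Emb t1 t2 (P ++ Q) = true := by
  suffices hs : ∀ (X Pr t1r t2r : List Char), embRev t1r t2r Pr = true →
      embRev t1r t2r (X ++ Pr) = true by
    unfold Emb at *
    rw [List.reverse_append]
    exact hs _ _ _ _ h
  intro X
  induction X with
  | nil => intro Pr t1r t2r h; exact h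
  | cons x X ih =>
    intro Pr t1r t2r h
    rw [List.cons_append, embRev.eq_def]
    simp [ih Pr t1r t2r h]

-- ===== A-side correctness =====

-- dp[j] (as tracked by A) is "the largest b with t2[:b] disjointly embeddable alongside t1[:j]"
def GoodA (t1 t2 P : List Char) (v : Int) : Prop :=
  -1 ≤ v ∧ v ≤ (t2.length : Int) ∧
  ∀ b : Nat, b ≤ t2.length → (Emb t1 (t2.take b) P = true ↔ (b : Int) ≤ v)

theorem take_snoc {α : Type} (l : List α) (j : Nat) (h1 : 1 ≤ j) (h2 : j ≤ l.length) :
    l.take j = l.take (j-1) ++ [l[j-1]'(by omega)] := by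
  have h := List.take_add_one (l := l) (i := j-1)
  rw [show j-1+1 = j from by omega] at h
  rw [h, List.getElem?_eq_getElem (by omega)]
  simp

-- A's per-character update preserves GoodA (the heart of A's correctness)
theorem goodA_step (t1 t2 P : List Char) (s : Char) (j : Nat) (hj : j ≤ t1.length)
    (vj vj' : Int) (Hj : GoodA (t1.take j) t2 P vj)
    (Hj' : 0 < j → GoodA (t1.take (j-1)) t2 P vj') :
    GoodA (t1.take j) t2 (P ++ [s])
      (let v1 := if 0 ≤ vj ∧ vj < (t2.length : Int) ∧ PySem.List.pyGet? t2 vj = some s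
                 then vj + 1 else vj
       if 0 < j ∧ PySem.List.pyGet? t1 ((j : Int) - 1) = some s
       then max v1 vj' else v1) := by
  obtain ⟨hlo, hhi, hiff⟩ := Hj
  set v1 := if 0 ≤ vj ∧ vj < (t2.length : Int) ∧ PySem.List.pyGet? t2 vj = some s
            then vj + 1 else vj with hv1
  have hv1lo : vj ≤ v1 := by rw [hv1]; split_ifs <;> omega
  have hv1hi : v1 ≤ (t2.length : Int) := by rw [hv1]; split_ifs with h <;> omega
  set v2 := if 0 < j ∧ PySem.List.pyGet? t1 ((j : Int) - 1) = some s
            then max v1 vj' else v1 with hv2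
  have hv2lo : v1 ≤ v2 := by rw [hv2]; split_ifs <;> simp
  have hv2hi : v2 ≤ (t2.length : Int) := by
    rw [hv2]; split_ifs with h
    · exact max_le hv1hi (Hj' h.1).2.1
    · exact hv1hi
  refine ⟨by omega, hv2hi, ?_⟩
  intro b hb
  constructor
  · intro hE
    rcases (emb_snoc_iff _ _ _ _).mp hE with ⟨u, hu, hEu⟩ | ⟨w, hw, hEw⟩ | hE0
    · -- s used as last char of t1[:j]
      have hj1 : 1 ≤ j := by
        by_contra hc
        have : j = 0 := by omega
        rw [this] at hu; simp at hu
      have hts : t1.take j = t1.take (j-1) ++ [t1[j-1]'(by omega)] := take_snoc t1 j hj1 hj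
      rw [hts] at hu
      obtain ⟨hu1, hu2⟩ := List.append_inj' hu rfl
      have hu2' : t1[j-1]'(by omega) = s := by simpa using hu2
      have hcond : 0 < j ∧ PySem.List.pyGet? t1 ((j : Int) - 1) = some s := by
        refine ⟨hj1, ?_⟩
        have : ((j : Int) - 1) = ((j - 1 : Nat) : Int) := by omega
        rw [this, PySem.List.pyGet?_natCast, List.getElem?_eq_getElem (by omega), hu2']
      have hble : (b : Int) ≤ vj' := by
        rw [← hu1] at hEu
        exact ((Hj' hj1).2.2 b hb).mp hEu
      rw [hv2, if_pos hcond]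
      omega
    · -- s used as last char of t2[:b]
      have hb1 : 1 ≤ b := by
        by_contra hc
        have : b = 0 := by omega
        rw [this] at hw; simp at hw
      have hts : t2.take b = t2.take (b-1) ++ [t2[b-1]'(by omega)] := take_snoc t2 b hb1 hb
      rw [hts] at hw
      obtain ⟨hw1, hw2⟩ := List.append_inj' hw rfl
      have hw2' : t2[b-1]'(by omega) = s := by simpa using hw2
      rw [← hw1] at hEw
      have hble : ((b - 1 : Nat) : Int) ≤ vj := (hiff (b-1) (by omega)).mp hEw
      rcases lt_or_eq_of_le hble with hlt | heq
      · have : (b : Int) ≤ vj := by omega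
        omega
      · -- b - 1 = vj: the increment branch fires
        have hvj0 : 0 ≤ vj := by omega
        have hvjlt : vj < (t2.length : Int) := by omega
        have hget : PySem.List.pyGet? t2 vj = some s := by
          rw [← heq, PySem.List.pyGet?_natCast, List.getElem?_eq_getElem (by omega), hw2']
        have : v1 = vj + 1 := by rw [hv1, if_pos ⟨hvj0, hvjlt, hget⟩]
        omega
    · -- s unused
      have := (hiff b hb).mp hE0
      omega
  · intro hble
    by_cases hbvj : (b : Int) ≤ vj
    · exact emb_append _ _ _ _ ((hiff b hb).mpr hbvj)
    · -- vj < b ≤ v2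
      by_cases hcond : 0 < j ∧ PySem.List.pyGet? t1 ((j : Int) - 1) = some s
      · rw [hv2, if_pos hcond] at hble
        rcases le_max_iff.mp hble with hble1 | hble1
        · -- b ≤ v1, vj < b: increment fired and b = vj + 1
          have hinc : 0 ≤ vj ∧ vj < (t2.length : Int) ∧ PySem.List.pyGet? t2 vj = some s := by
            by_contra hc
            rw [hv1, if_neg hc] at hble1
            omega
          have hbeq : (b : Int) = vj + 1 := by
            have : v1 = vj + 1 := by rw [hv1, if_pos hinc]
            omega
          have hvn : vj = ((vj.toNat : Nat) : Int) := by omega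
          have hEprev : Emb (t1.take j) (t2.take vj.toNat) P = true :=
            (hiff vj.toNat (by omega)).mpr (by omega)
          have hget : t2[vj.toNat]'(by omega) = s := by
            have := hinc.2.2
            rw [hvn, PySem.List.pyGet?_natCast, List.getElem?_eq_getElem (by omega)] at this
            simpa using this
          have hbn : b - 1 = vj.toNat := by omega
          have hts : t2.take b = t2.take vj.toNat ++ [s] := by
            rw [take_snoc t2 b (by omega) (by omega)]
            simp only [hbn]
            rw [hget]
          rw [hts]
          exact (emb_snoc_iff _ _ _ _).mpr (Or.inr (Or.inl ⟨t2.take vj.toNat, rfl, hEprev⟩))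
        · -- b ≤ vj': append s as last char of t1[:j]
          have hj1 := hcond.1
          have hEprev : Emb (t1.take (j-1)) (t2.take b) P = true :=
            ((Hj' hj1).2.2 b hb).mpr hble1
          have hget : t1[j-1]'(by omega) = s := by
            have := hcond.2
            rw [show ((j : Int) - 1) = ((j - 1 : Nat) : Int) by omega,
              PySem.List.pyGet?_natCast, List.getElem?_eq_getElem (by omega)] at this
            simpa using this
          have hts : t1.take j = t1.take (j-1) ++ [s] := by
            rw [take_snoc t1 j hj1 hj, hget]
          rw [hts]
          exact (emb_snoc_iff _ _ _ _).mpr (Or.inl ⟨t1.take (j-1), rfl, hEprev⟩)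
      · rw [hv2, if_neg hcond] at hble
        -- b ≤ v1, vj < b: increment fired, b = vj + 1, append s to t2 side
        have hinc : 0 ≤ vj ∧ vj < (t2.length : Int) ∧ PySem.List.pyGet? t2 vj = some s := by
          by_contra hc
          rw [hv1, if_neg hc] at hble
          omega
        have hbeq : (b : Int) = vj + 1 := by
          have : v1 = vj + 1 := by rw [hv1, if_pos hinc]
          omega
        have hEprev : Emb (t1.take j) (t2.take vj.toNat) P = true :=
          (hiff vj.toNat (by omega)).mpr (by omega)
        have hget : t2[vj.toNat]'(by omega) = s := by
          have := hinc.2.2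
          rw [show vj = ((vj.toNat : Nat) : Int) by omega, PySem.List.pyGet?_natCast,
            List.getElem?_eq_getElem (by omega)] at this
          simpa using this
        have hbn : b - 1 = vj.toNat := by omega
        have hts : t2.take b = t2.take vj.toNat ++ [s] := by
          rw [take_snoc t2 b (by omega) (by omega)]
          simp only [hbn]
          rw [hget]
        rw [hts]
        exact (emb_snoc_iff _ _ _ _).mpr (Or.inr (Or.inl ⟨t2.take vj.toNat, rfl, hEprev⟩))

-- pointwise value written by one body of A's inner loop
def phiA (t1 t2 : List Char) (s : Char) (dp : List Int) (j : Nat) : Int :=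
  let dpj := (PySem.List.pyGet? dp (j : Int)).getD (-1)
  let dpj := if 0 ≤ dpj ∧ dpj < (t2.length : Int) ∧ PySem.List.pyGet? t2 dpj = some s
             then dpj + 1 else dpj
  if 0 < j ∧ PySem.List.pyGet? t1 ((j : Int) - 1) = some s
  then max dpj ((PySem.List.pyGet? dp ((j : Int) - 1)).getD (-1)) else dpj

theorem aStep_eq (t1 t2 : List Char) (s : Char) (dp : List Int) (j : Nat) :
    aStep t1 t2 s dp j = dp.set j (phiA t1 t2 s dp j) := rfl

theorem aStep_length (t1 t2 : List Char) (s : Char) (dp : List Int) (j : Nat) :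
    (aStep t1 t2 s dp j).length = dp.length := by
  rw [aStep_eq]; exact List.length_set ..

theorem aJLoop_length (t1 t2 : List Char) (s : Char) :
    ∀ (j : Nat) (dp : List Int), (aJLoop t1 t2 s j dp).length = dp.length := by
  intro j
  induction j with
  | zero => intro dp; simp [aJLoop, aStep_length]
  | succ j ih => intro dp; simp [aJLoop, ih, aStep_length]

theorem pyGet?_set_natCast_ne (dp : List Int) (m : Nat) (w : Int) (r : Nat) (h : m ≠ r) :
    PySem.List.pyGet? (dp.set m w) (r : Int) = PySem.List.pyGet? dp (r : Int) := by
  simp [PySem.List.pyGet?_natCast, List.getElem?_set_ne h]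

theorem phiA_set_high (t1 t2 : List Char) (s : Char) (dp : List Int) (m : Nat) (w : Int)
    (kk : Nat) (h : kk < m) :
    phiA t1 t2 s (dp.set m w) kk = phiA t1 t2 s dp kk := by
  cases kk with
  | zero =>
    simp only [phiA, Nat.cast_zero, lt_self_iff_false, false_and, if_false]
    rw [show ((0 : Int)) = ((0 : Nat) : Int) from rfl,
      pyGet?_set_natCast_ne dp m w 0 (by omega)]
  | succ k' =>
    have e1 : ((k' + 1 : Nat) : Int) - 1 = ((k' : Nat) : Int) := by push_cast; ring
    simp only [phiA, e1]
    rw [pyGet?_set_natCast_ne dp m w (k'+1) (by omega),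
      pyGet?_set_natCast_ne dp m w k' (by omega)]

theorem aJLoop_getElem? (t1 t2 : List Char) (s : Char) :
    ∀ (j : Nat) (dp : List Int), j < dp.length → ∀ kk : Nat,
      (aJLoop t1 t2 s j dp)[kk]? =
        if kk ≤ j then some (phiA t1 t2 s dp kk) else dp[kk]? := by
  intro j
  induction j with
  | zero =>
    intro dp hj kk
    rw [aJLoop, aStep_eq]
    rcases Nat.eq_zero_or_pos kk with h0 | h0
    · subst h0
      rw [if_pos (le_refl _)]
      simp [hj]
    · rw [if_neg (by omega)]
      exact List.getElem?_set_ne (by omega)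
  | succ j ih =>
    intro dp hj kk
    rw [aJLoop, aStep_eq]
    have hj' : j < (dp.set (j+1) (phiA t1 t2 s dp (j+1))).length := by
      rw [List.length_set]; omega
    rw [ih _ hj' kk]
    by_cases hkk : kk ≤ j
    · rw [if_pos hkk, if_pos (by omega)]
      rw [phiA_set_high t1 t2 s dp (j+1) _ kk (by omega)]
    · rw [if_neg hkk]
      by_cases hk2 : kk = j + 1
      · subst hk2
        rw [if_pos (le_refl _)]
        simp [hj]
      · rw [if_neg (by omega)]
        exact List.getElem?_set_ne (by omega)

theorem aScan_length (t1 t2 : List Char) :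
    ∀ (Sl : List Char) (dp : List Int), (aScan t1 t2 Sl dp).length = dp.length := by
  intro Sl
  induction Sl with
  | nil => intro dp; rfl
  | cons ch Sl ih =>
    intro dp
    simp only [aScan, List.foldl_cons] at *
    rw [ih, aJLoop_length]

theorem aOuter_eq_any (Sl tl : List Char) :
    ∀ l : List Int, aOuter Sl tl l = l.any (aCheck Sl tl) := by
  intro l
  induction l with
  | nil => rfl
  | cons i rest ih => by_cases h : aCheck Sl tl i = true <;> simp [aOuter, h, ih]

-- phiA as a function of the two relevant old dp values
theorem phiA_val (t1 t2 : List Char) (s : Char) (dp : List Int) (j : Nat)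
    (hlen : dp.length = t1.length + 1) (hj : j ≤ t1.length) :
    phiA t1 t2 s dp j =
      (let vj := (dp[j]?).getD 0
       let vj' := (dp[j-1]?).getD 0
       let v1 := if 0 ≤ vj ∧ vj < (t2.length : Int) ∧ PySem.List.pyGet? t2 vj = some s
                 then vj + 1 else vj
       if 0 < j ∧ PySem.List.pyGet? t1 ((j : Int) - 1) = some s
       then max v1 vj' else v1) := by
  have hjget : PySem.List.pyGet? dp (j : Int) = some (dp[j]'(by omega)) := by
    rw [PySem.List.pyGet?_natCast, List.getElem?_eq_getElem (by omega)]
  cases j with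
  | zero =>
    have hdrop : ∀ x : Int,
        (if 0 < (0:Nat) ∧ PySem.List.pyGet? t1 (((0:Nat) : Int) - 1) = some s
         then max x ((PySem.List.pyGet? dp (((0:Nat) : Int) - 1)).getD (-1)) else x) = x :=
      fun x => if_neg (by simp)
    simp only [phiA, hjget, Option.getD_some, hdrop,
      List.getElem?_eq_getElem (show (0:Nat) < dp.length by omega)]
    simp
  | succ j' =>
    have e1 : ((j' + 1 : Nat) : Int) - 1 = ((j' : Nat) : Int) := by push_cast; ring
    have hj'get : PySem.List.pyGet? dp ((j' : Nat) : Int) = some (dp[j']'(by omega)) := by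
      rw [PySem.List.pyGet?_natCast, List.getElem?_eq_getElem (by omega)]
    simp only [phiA, hjget, e1, hj'get]
    simp [List.getElem?_eq_getElem (show j' + 1 < dp.length by omega),
      List.getElem?_eq_getElem (show j' < dp.length by omega)]

-- A's scan preserves GoodA at every slot
theorem aScan_good (t1 t2 : List Char) :
    ∀ (Sl' P : List Char) (dp : List Int),
      dp.length = t1.length + 1 →
      (∀ j : Nat, j ≤ t1.length → GoodA (t1.take j) t2 P ((dp[j]?).getD 0)) →
      ∀ j : Nat, j ≤ t1.length →
        GoodA (t1.take j) t2 (P ++ Sl') (((aScan t1 t2 Sl' dp)[j]?).getD 0) := by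
  intro Sl'
  induction Sl' with
  | nil => intro P dp hlen H j hj; simpa [aScan] using H j hj
  | cons s Sl' ih =>
    intro P dp hlen H j hj
    have hstep : aScan t1 t2 (s :: Sl') dp = aScan t1 t2 Sl' (aJLoop t1 t2 s t1.length dp) := by
      simp [aScan]
    rw [hstep, show P ++ s :: Sl' = (P ++ [s]) ++ Sl' by simp]
    apply ih (P ++ [s]) _ (by rw [aJLoop_length]; exact hlen) _ j hj
    intro j' hj'
    rw [aJLoop_getElem? t1 t2 s t1.length dp (by omega) j', if_pos hj']
    simp only [Option.getD_some]
    rw [phiA_val t1 t2 s dp j' hlen hj']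
    exact goodA_step t1 t2 P s j' hj' _ _ (H j' hj') (fun _ => H (j'-1) (by omega))

-- the initial DP row is GoodA for the empty processed prefix
theorem goodA_init (t1 t2 : List Char) (j : Nat) (hj : j ≤ t1.length) :
    GoodA (t1.take j) t2 []
      ((((List.replicate (t1.length + 1) (-1 : Int)).set 0 0)[j]?).getD 0) := by
  cases j with
  | zero =>
    have : (((List.replicate (t1.length + 1) (-1 : Int)).set 0 0)[0]?) = some 0 := by
      rw [List.getElem?_eq_getElem (by simp)]
      simp
    rw [this]
    simp only [Option.getD_some]
    refine ⟨by omega, by positivity, ?_⟩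
    intro b hb
    rw [List.take_zero, emb_nil_iff]
    constructor
    · rintro ⟨-, h2⟩
      rcases List.take_eq_nil_iff.mp h2 with h | h
      · omega
      · subst h; simp at hb; omega
    · intro h
      have : b = 0 := by omega
      subst this; simp
  | succ j' =>
    have hne : j' + 1 ≠ 0 := by omega
    have : (((List.replicate (t1.length + 1) (-1 : Int)).set 0 0)[j'+1]?) = some (-1) := by
      rw [List.getElem?_set_ne (by omega), List.getElem?_eq_getElem (by simpa using hj)]
      simp
    rw [this]
    simp only [Option.getD_some]
    refine ⟨by omega, by omega, ?_⟩
    intro b hb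
    constructor
    · intro h
      exfalso
      have := (emb_nil_iff _ _).mp h
      rcases List.take_eq_nil_iff.mp this.1 with h' | h'
      · omega
      · subst h'; simp at hj
    · intro h; exfalso; omega

-- A's per-split check decides the disjoint-embedding predicate
theorem aCheck_iff (Sl tl : List Char) (k : Nat) (hk1 : 1 ≤ k) (hk : k ≤ tl.length) :
    (aCheck Sl tl (k : Int) = true) ↔ Emb (tl.take k) (tl.drop k) Sl = true := by
  have ht1 : (PySem.List.slice tl none (some (k : Int))) = tl.take k := by
    rw [PySem.List.slice_to_natCast]
  have ht2 : (PySem.List.slice tl (some (k : Int)) none) = tl.drop k := by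
    rw [PySem.List.slice_from_natCast]
  have hlt1 : (tl.take k).length = k := by rw [List.length_take]; omega
  simp only [aCheck, ht1, ht2, hlt1]
  set t1 := tl.take k
  set t2 := tl.drop k
  set dp0 := (List.replicate (k + 1) (-1 : Int)).set 0 0 with hdp0
  set dp := aScan t1 t2 Sl dp0 with hdp
  have hlen : dp.length = k + 1 := by
    rw [hdp, aScan_length, hdp0]; simp
  have hlen0 : dp0.length = t1.length + 1 := by rw [hdp0]; simp [hlt1]
  have hG : GoodA t1 t2 Sl ((dp[t1.length]?).getD 0) := by
    have := aScan_good t1 t2 Sl [] dp0 hlen0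
      (by intro j hj; rw [← hlt1] at hdp0; exact hdp0 ▸ goodA_init t1 t2 j hj)
      t1.length (le_refl _)
    simpa [List.take_length] using this
  have hne : dp ≠ [] := by intro h; rw [h] at hlen; simp at hlen
  rw [show PySem.List.pyGet? dp (-1) = some (dp.getLast hne) from by
    rw [PySem.List.pyGet?_neg_one, List.getLast?_eq_some_getLast hne]]
  have hval : (dp[t1.length]?).getD 0 = dp.getLast hne := by
    rw [List.getLast_eq_getElem, List.getElem?_eq_getElem (by omega)]
    simp only [Option.getD_some]
    congr 1
    omega
  obtain ⟨hlo, hhi, hiff⟩ := hG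
  rw [hval] at hlo hhi hiff
  constructor
  · intro h
    have heq : dp.getLast hne = (t2.length : Int) := by simpa using h
    have := (hiff t2.length (le_refl _)).mpr (by omega)
    simpa [List.take_length] using this
  · intro h
    have h' : Emb t1 (t2.take t2.length) Sl = true := by simpa [List.take_length] using h
    have := (hiff t2.length (le_refl _)).mp h'
    simp only [decide_eq_true_eq, Option.some_inj]
    omega

-- ===== B-side correctness =====

-- dict built by folding inserts of f over a key list
theorem dict_get_foldl_insert (f : Char → List Int) :
    ∀ (L : List Char) (d : PySem.Dict Char (List Int)) (c : Char),
      ((L.foldl (fun d c => d.insert c (f c)) d).get? c) =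
        if c ∈ L then some (f c) else d.get? c := by
  intro L
  induction L with
  | nil => intro d c; simp
  | cons x L ih =>
    intro d c
    rw [List.foldl_cons, ih]
    by_cases hc : c ∈ L
    · rw [if_pos hc, if_pos (List.mem_cons_of_mem _ hc)]
    · rw [if_neg hc]
      by_cases hcx : c = x
      · subst hcx
        rw [if_pos (List.mem_cons_self ..), PySem.Dict.get?_insert_self]
      · rw [if_neg (by simp [hcx, hc]), PySem.Dict.get?_insert_of_ne _ _ hcx]

theorem tbl_get (Sl tl : List Char) (inf : Int) (c : Char) (hc : c ∈ tl) :
    (bTbl Sl tl inf).get? c = some (bNextGo c inf 0 Sl) := by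
  unfold bTbl
  rw [dict_get_foldl_insert (fun c => bNextGo c inf 0 Sl),
    if_pos ((PySem.Set.mem_ofList tl c).mpr hc)]

-- value q of the next-occurrence list: first occurrence of c at a position ≥ q, or inf
theorem bNextGo_get (c : Char) (inf : Int) :
    ∀ (rest : List Char) (off q : Nat), q ≤ rest.length →
      ∃ r, (bNextGo c inf off rest)[q]? = some r ∧
        ( (r = inf ∧ ∀ p : Nat, q ≤ p → ∀ hp : p < rest.length, rest[p] ≠ c)
        ∨ (∃ p : Nat, q ≤ p ∧ ∃ hp : p < rest.length, rest[p] = c ∧ r = (off : Int) + p + 1 ∧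
            ∀ p' : Nat, q ≤ p' → p' < p → ∀ hp' : p' < rest.length, rest[p'] ≠ c) ) := by
  intro rest
  induction rest with
  | nil =>
    intro off q hq
    have : q = 0 := by simpa using hq
    subst this
    exact ⟨inf, rfl, Or.inl ⟨rfl, by intro p _ hp; simp at hp⟩⟩
  | cons s rest ih =>
    intro off q hq
    cases q with
    | zero =>
      by_cases hs : s = c
      · refine ⟨(off : Int) + 1, by simp [bNextGo, hs], Or.inr ⟨0, le_refl _, by simp, by simpa using hs, by push_cast; ring, by omega⟩⟩
      · obtain ⟨r', hr', hP⟩ := ih (off + 1) 0 (Nat.zero_le _)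
        refine ⟨r', ?_, ?_⟩
        · simp [bNextGo, hs, List.head?_eq_getElem?, hr']
        · rcases hP with ⟨hr, hmin⟩ | ⟨p, hqp, hp, hpc, hr, hmin⟩
          · refine Or.inl ⟨hr, ?_⟩
            intro p _ hp
            cases p with
            | zero => simpa using hs
            | succ p' => simpa using hmin p' (Nat.zero_le _) (by simpa using hp)
          · refine Or.inr ⟨p + 1, Nat.zero_le _, by simpa using hp, by simpa using hpc, by push_cast at hr ⊢; omega, ?_⟩
            intro p' _ hp' hlt'
            cases p' with
            | zero => simpa using hs
            | succ p'' => simpa using hmin p'' (Nat.zero_le _) (by omega) (by simpa using hlt')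
    | succ q' =>
      obtain ⟨r', hr', hP⟩ := ih (off + 1) q' (by simpa using hq)
      refine ⟨r', by simpa [bNextGo] using hr', ?_⟩
      rcases hP with ⟨hr, hmin⟩ | ⟨p, hqp, hp, hpc, hr, hmin⟩
      · refine Or.inl ⟨hr, ?_⟩
        intro p hqp hp
        cases p with
        | zero => omega
        | succ p'' => simpa using hmin p'' (by omega) (by simpa using hp)
      · refine Or.inr ⟨p + 1, by omega, by simpa using hp, by simpa using hpc, by push_cast at hr ⊢; omega, ?_⟩
        intro p' hqp' hlt' hp'
        cases p' with
        | zero => omega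
        | succ p'' => simpa using hmin p'' (by omega) (by omega) (by simpa using hp')

-- the nxt function actually used by solve_one_alt
def theNxt (Sl tl : List Char) : Int → Char → Int :=
  fun q c => bNxt (bTbl Sl tl ((Sl.length : Int) + 1)) (Sl.length : Int) ((Sl.length : Int) + 1) q c

theorem theNxt_spec (Sl tl : List Char) (c : Char) (hc : c ∈ tl) (q : Int)
    (h0 : 0 ≤ q) (hq : q ≤ (Sl.length : Int)) :
    ( (theNxt Sl tl q c = (Sl.length : Int) + 1 ∧
        ∀ p : Nat, q ≤ (p : Int) → ∀ hp : p < Sl.length, Sl[p] ≠ c)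
    ∨ (∃ p : Nat, q ≤ (p : Int) ∧ ∃ hp : p < Sl.length, Sl[p] = c ∧
        theNxt Sl tl q c = (p : Int) + 1 ∧
        ∀ p' : Nat, q ≤ (p' : Int) → p' < p → ∀ hp' : p' < Sl.length, Sl[p'] ≠ c) ) := by
  obtain ⟨r, hr, hP⟩ := bNextGo_get c ((Sl.length : Int) + 1) Sl 0 q.toNat (by omega)
  have hval : theNxt Sl tl q c = r := by
    unfold theNxt bNxt
    rw [if_pos hq, tbl_get Sl tl _ c hc]
    simp only [Option.getD_some]
    rw [show q = ((q.toNat : Nat) : Int) by omega, PySem.List.pyGetD_natCast]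
    rw [List.getD_eq_getElem?_getD, hr]
    rfl
  rw [hval]
  rcases hP with ⟨hr', hmin⟩ | ⟨p, hqp, hp, hpc, hr', hmin⟩
  · exact Or.inl ⟨hr', by intro p hple hp; exact hmin p (by omega) hp⟩
  · refine Or.inr ⟨p, by omega, hp, hpc, by omega, ?_⟩
    intro p' hqp' hlt' hp'
    exact hmin p' (by omega) hlt' hp'

theorem theNxt_big (Sl tl : List Char) (c : Char) (q : Int) (hq : (Sl.length : Int) < q) :
    theNxt Sl tl q c = (Sl.length : Int) + 1 := by
  unfold theNxt bNxt
  rw [if_neg (by omega)]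

theorem theNxt_bounds (Sl tl : List Char) (c : Char) (hc : c ∈ tl) (q : Int)
    (h0 : 0 ≤ q) (hq : q ≤ (Sl.length : Int) + 1) :
    0 ≤ theNxt Sl tl q c ∧ theNxt Sl tl q c ≤ (Sl.length : Int) + 1 := by
  by_cases hqm : q ≤ (Sl.length : Int)
  · rcases theNxt_spec Sl tl c hc q h0 hqm with ⟨hr, -⟩ | ⟨p, hqp, hp, -, hr, -⟩
    · omega
    · have : (p : Int) < (Sl.length : Int) := by exact_mod_cast hp
      omega
  · rw [theNxt_big Sl tl c q (by omega)]; omega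

theorem theNxt_le_of_occ (Sl tl : List Char) (c : Char) (hc : c ∈ tl) (q : Int)
    (h0 : 0 ≤ q) (p : Nat) (hqp : q ≤ (p : Int)) (hp : p < Sl.length) (hpc : Sl[p] = c) :
    theNxt Sl tl q c ≤ (p : Int) + 1 := by
  have hq : q ≤ (Sl.length : Int) := by
    have : (p : Int) < (Sl.length : Int) := by exact_mod_cast hp
    omega
  rcases theNxt_spec Sl tl c hc q h0 hq with ⟨-, hmin⟩ | ⟨p0, hqp0, hp0, hpc0, hr, hmin⟩
  · exact absurd hpc (hmin p hqp hp)
  · by_cases hple : p0 ≤ p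
    · omega
    · exact absurd hpc (hmin p hqp (by omega) hp)

theorem theNxt_ret (Sl tl : List Char) (c : Char) (hc : c ∈ tl) (q : Int)
    (h0 : 0 ≤ q) (hr : theNxt Sl tl q c ≤ (Sl.length : Int)) :
    ∃ p : Nat, q ≤ (p : Int) ∧ ∃ hp : p < Sl.length, Sl[p] = c ∧
      theNxt Sl tl q c = (p : Int) + 1 := by
  by_cases hq : q ≤ (Sl.length : Int)
  · rcases theNxt_spec Sl tl c hc q h0 hq with ⟨hr', -⟩ | ⟨p, hqp, hp, hpc, hr', -⟩
    · omega
    · exact ⟨p, hqp, hp, hpc, hr'⟩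
  · rw [theNxt_big Sl tl c q (by omega)] at hr; omega

-- B's DP value: shortest prefix length of S disjointly embedding x and y
def GoodB (Sl x y : List Char) (w : Int) : Prop :=
  0 ≤ w ∧ w ≤ (Sl.length : Int) + 1 ∧
  ∀ L : Nat, L ≤ Sl.length → (Emb x y (Sl.take L) = true ↔ w ≤ (L : Int))

theorem emb_take_mono (x y Sl : List Char) (L1 L2 : Nat) (h12 : L1 ≤ L2)
    (h : Emb x y (Sl.take L1) = true) : Emb x y (Sl.take L2) = true := by
  have : Sl.take L2 = Sl.take L1 ++ (Sl.drop L1).take (L2 - L1) := by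
    rw [← List.take_add]
    congr 1
    omega
  rw [this]
  exact emb_append _ _ _ _ h

-- appending one matched character: the t1 side
theorem goodB_ext_t1 (Sl tl x y : List Char) (c : Char) (hc : c ∈ tl) (w : Int)
    (H : GoodB Sl x y w) (L : Nat) (hL : L ≤ Sl.length)
    (hr : theNxt Sl tl w c ≤ (L : Int)) : Emb (x ++ [c]) y (Sl.take L) = true := by
  obtain ⟨h0, hw, hiff⟩ := H
  obtain ⟨p, hqp, hp, hpc, hr'⟩ := theNxt_ret Sl tl c hc w h0 (by
    have : (L : Int) ≤ (Sl.length : Int) := by exact_mod_cast hL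
    omega)
  have hEp : Emb x y (Sl.take p) = true := (hiff p (by omega)).mpr hqp
  have hsnoc : Sl.take (p+1) = Sl.take p ++ [c] := by
    rw [take_snoc Sl (p+1) (by omega) (by omega)]
    simp only [Nat.add_sub_cancel]
    rw [hpc]
  have hE1 : Emb (x ++ [c]) y (Sl.take (p+1)) = true := by
    rw [hsnoc]
    exact (emb_snoc_iff _ _ _ _).mpr (Or.inl ⟨x, rfl, hEp⟩)
  exact emb_take_mono _ _ _ _ _ (by omega) hE1

-- appending one matched character: the t2 side
theorem goodB_ext_t2 (Sl tl x y : List Char) (c : Char) (hc : c ∈ tl) (w : Int)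
    (H : GoodB Sl x y w) (L : Nat) (hL : L ≤ Sl.length)
    (hr : theNxt Sl tl w c ≤ (L : Int)) : Emb x (y ++ [c]) (Sl.take L) = true := by
  obtain ⟨h0, hw, hiff⟩ := H
  obtain ⟨p, hqp, hp, hpc, hr'⟩ := theNxt_ret Sl tl c hc w h0 (by
    have : (L : Int) ≤ (Sl.length : Int) := by exact_mod_cast hL
    omega)
  have hEp : Emb x y (Sl.take p) = true := (hiff p (by omega)).mpr hqp
  have hsnoc : Sl.take (p+1) = Sl.take p ++ [c] := by
    rw [take_snoc Sl (p+1) (by omega) (by omega)]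
    simp only [Nat.add_sub_cancel]
    rw [hpc]
  have hE1 : Emb x (y ++ [c]) (Sl.take (p+1)) = true := by
    rw [hsnoc]
    exact (emb_snoc_iff _ _ _ _).mpr (Or.inr (Or.inl ⟨y, rfl, hEp⟩))
  exact emb_take_mono _ _ _ _ _ (by omega) hE1

-- the initial-row transition (t1 part still empty)
theorem goodB_init_step (Sl tl y0 : List Char) (cy : Char) (hcy : cy ∈ tl) (w : Int)
    (H : GoodB Sl [] y0 w) : GoodB Sl [] (y0 ++ [cy]) (theNxt Sl tl w cy) := by
  obtain ⟨h0, hw, hiff⟩ := H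
  obtain ⟨hb0, hb1⟩ := theNxt_bounds Sl tl cy hcy w h0 hw
  refine ⟨hb0, hb1, ?_⟩
  intro L
  induction L with
  | zero =>
    intro _
    constructor
    · intro h
      rw [List.take_zero] at h
      have := (emb_nil_iff _ _).mp h
      simp at this
    · intro h
      exfalso
      have : theNxt Sl tl w cy = 0 := by omega
      have hwle : w ≤ (Sl.length : Int) + 1 := hw
      by_cases hq : w ≤ (Sl.length : Int)
      · rcases theNxt_spec Sl tl cy hcy w h0 hq with ⟨hr, -⟩ | ⟨p, -, -, -, hr, -⟩ <;> omega
      · rw [theNxt_big Sl tl cy w (by omega)] at this; omega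
  | succ L ihL =>
    intro hL
    have hLm : L ≤ Sl.length := by omega
    constructor
    · intro h
      rw [take_snoc Sl (L+1) (by omega) (by omega)] at h
      simp only [Nat.add_sub_cancel] at h
      rcases (emb_snoc_iff _ _ _ _).mp h with ⟨u, hu, -⟩ | ⟨v, hv, hEv⟩ | hE0
      · simp at hu
      · obtain ⟨hv1, hv2⟩ := List.append_inj' hv rfl
        have hcS : Sl[L]'(by omega) = cy := by
          have : cy = Sl[L]'(by omega) := by simpa using hv2
          exact this.symm
        rw [← hv1] at hEv
        have hwL : w ≤ (L : Int) := (hiff L hLm).mp hEv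
        have := theNxt_le_of_occ Sl tl cy hcy w h0 L hwL (by omega) hcS
        push_cast
        omega
      · have := (ihL hLm).mp hE0
        push_cast at this ⊢
        omega
    · intro h
      exact goodB_ext_t2 Sl tl [] y0 cy hcy w ⟨h0, hw, hiff⟩ (L+1) hL (by push_cast at h ⊢; omega)

-- the b = 0 transition (t2 part empty)
theorem goodB_step0 (Sl tl x0 : List Char) (cx : Char) (hcx : cx ∈ tl) (w : Int)
    (H : GoodB Sl x0 [] w) : GoodB Sl (x0 ++ [cx]) [] (theNxt Sl tl w cx) := by
  obtain ⟨h0, hw, hiff⟩ := H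
  obtain ⟨hb0, hb1⟩ := theNxt_bounds Sl tl cx hcx w h0 hw
  refine ⟨hb0, hb1, ?_⟩
  intro L
  induction L with
  | zero =>
    intro _
    constructor
    · intro h
      rw [List.take_zero] at h
      have := (emb_nil_iff _ _).mp h
      simp at this
    · intro h
      exfalso
      have : theNxt Sl tl w cx = 0 := by omega
      by_cases hq : w ≤ (Sl.length : Int)
      · rcases theNxt_spec Sl tl cx hcx w h0 hq with ⟨hr, -⟩ | ⟨p, -, -, -, hr, -⟩ <;> omega
      · rw [theNxt_big Sl tl cx w (by omega)] at this; omega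
  | succ L ihL =>
    intro hL
    have hLm : L ≤ Sl.length := by omega
    constructor
    · intro h
      rw [take_snoc Sl (L+1) (by omega) (by omega)] at h
      simp only [Nat.add_sub_cancel] at h
      rcases (emb_snoc_iff _ _ _ _).mp h with ⟨u, hu, hEu⟩ | ⟨v, hv, -⟩ | hE0
      · obtain ⟨hu1, hu2⟩ := List.append_inj' hu rfl
        have hcS : Sl[L]'(by omega) = cx := by
          have : cx = Sl[L]'(by omega) := by simpa using hu2
          exact this.symm
        rw [← hu1] at hEu
        have hwL : w ≤ (L : Int) := (hiff L hLm).mp hEu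
        have := theNxt_le_of_occ Sl tl cx hcx w h0 L hwL (by omega) hcS
        push_cast
        omega
      · simp at hv
      · have := (ihL hLm).mp hE0
        push_cast at this ⊢
        omega
    · intro h
      exact goodB_ext_t1 Sl tl x0 [] cx hcx w ⟨h0, hw, hiff⟩ (L+1) hL (by push_cast at h ⊢; omega)

-- the general transition: min of the two candidate extensions
theorem goodB_step_min (Sl tl x0 y0 : List Char) (cx cy : Char) (hcx : cx ∈ tl)
    (hcy : cy ∈ tl) (w1 w2 : Int)
    (H1 : GoodB Sl x0 (y0 ++ [cy]) w1) (H2 : GoodB Sl (x0 ++ [cx]) y0 w2) :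
    GoodB Sl (x0 ++ [cx]) (y0 ++ [cy]) (min (theNxt Sl tl w1 cx) (theNxt Sl tl w2 cy)) := by
  obtain ⟨h01, hw1, hiff1⟩ := H1
  obtain ⟨h02, hw2, hiff2⟩ := H2
  obtain ⟨hb01, hb11⟩ := theNxt_bounds Sl tl cx hcx w1 h01 hw1
  obtain ⟨hb02, hb12⟩ := theNxt_bounds Sl tl cy hcy w2 h02 hw2
  refine ⟨by omega, by omega, ?_⟩
  intro L
  induction L with
  | zero =>
    intro _
    constructor
    · intro h
      rw [List.take_zero] at h
      have := (emb_nil_iff _ _).mp h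
      simp at this
    · intro h
      exfalso
      have hmin0 : min (theNxt Sl tl w1 cx) (theNxt Sl tl w2 cy) ≤ 0 := by omega
      rcases le_min_iff.mp (le_refl (min (theNxt Sl tl w1 cx) (theNxt Sl tl w2 cy))) with ⟨-, -⟩
      by_cases hcase : theNxt Sl tl w1 cx ≤ theNxt Sl tl w2 cy
      · have h1 : theNxt Sl tl w1 cx = 0 := by omega
        by_cases hq : w1 ≤ (Sl.length : Int)
        · rcases theNxt_spec Sl tl cx hcx w1 h01 hq with ⟨hr, -⟩ | ⟨p, -, -, -, hr, -⟩ <;> omega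
        · rw [theNxt_big Sl tl cx w1 (by omega)] at h1; omega
      · have h1 : theNxt Sl tl w2 cy = 0 := by omega
        by_cases hq : w2 ≤ (Sl.length : Int)
        · rcases theNxt_spec Sl tl cy hcy w2 h02 hq with ⟨hr, -⟩ | ⟨p, -, -, -, hr, -⟩ <;> omega
        · rw [theNxt_big Sl tl cy w2 (by omega)] at h1; omega
  | succ L ihL =>
    intro hL
    have hLm : L ≤ Sl.length := by omega
    constructor
    · intro h
      rw [take_snoc Sl (L+1) (by omega) (by omega)] at h
      simp only [Nat.add_sub_cancel] at h
      rcases (emb_snoc_iff _ _ _ _).mp h with ⟨u, hu, hEu⟩ | ⟨v, hv, hEv⟩ | hE0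
      · obtain ⟨hu1, hu2⟩ := List.append_inj' hu rfl
        have hcS : Sl[L]'(by omega) = cx := by
          have : cx = Sl[L]'(by omega) := by simpa using hu2
          exact this.symm
        rw [← hu1] at hEu
        have hwL : w1 ≤ (L : Int) := (hiff1 L hLm).mp hEu
        have := theNxt_le_of_occ Sl tl cx hcx w1 h01 L hwL (by omega) hcS
        push_cast
        omega
      · obtain ⟨hv1, hv2⟩ := List.append_inj' hv rfl
        have hcS : Sl[L]'(by omega) = cy := by
          have : cy = Sl[L]'(by omega) := by simpa using hv2
          exact this.symm
        rw [← hv1] at hEv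
        have hwL : w2 ≤ (L : Int) := (hiff2 L hLm).mp hEv
        have := theNxt_le_of_occ Sl tl cy hcy w2 h02 L hwL (by omega) hcS
        push_cast
        omega
      · have := (ihL hLm).mp hE0
        push_cast at this ⊢
        omega
    · intro h
      rcases min_le_iff.mp (le_refl (min (theNxt Sl tl w1 cx) (theNxt Sl tl w2 cy))) with h' | h'
      all_goals {
        by_cases hcase : theNxt Sl tl w1 cx ≤ (L+1 : Int)
        · exact goodB_ext_t1 Sl tl x0 (y0 ++ [cy]) cx hcx w1 ⟨h01, hw1, hiff1⟩ (L+1) hL (by push_cast; omega)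
        · have : theNxt Sl tl w2 cy ≤ ((L+1 : Nat) : Int) := by
            push_cast at h ⊢
            omega
          exact goodB_ext_t2 Sl tl (x0 ++ [cx]) y0 cy hcy w2 ⟨h02, hw2, hiff2⟩ (L+1) hL this
      }

-- ===== B-side row invariants =====

theorem bInitRow_length (nxt : Int → Char → Int) :
    ∀ (cs : List Char) (prev : Int), (bInitRow nxt prev cs).length = cs.length := by
  intro cs
  induction cs with
  | nil => intro prev; rfl
  | cons c cs ih => intro prev; simp [bInitRow, ih]

theorem bStepGo_length (nxt : Int → Char → Int) (c : Char) :
    ∀ (l : List (Char × Int)) (prev : Int), (bStepGo nxt c prev l).length = l.length := by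
  intro l
  induction l with
  | nil => intro prev; rfl
  | cons p l ih => obtain ⟨tc, old⟩ := p; intro prev; simp [bStepGo, ih]

theorem bInitRow_inv (Sl tl : List Char) :
    ∀ (cs y0 : List Char) (prev : Int),
      (∀ c ∈ cs, c ∈ tl) →
      GoodB Sl [] y0 prev →
      ∀ idx : Nat, idx < cs.length →
        ∃ r, (bInitRow (theNxt Sl tl) prev cs)[idx]? = some r ∧
          GoodB Sl [] (y0 ++ cs.take (idx+1)) r := by
  intro cs
  induction cs with
  | nil => intro y0 prev _ _ idx h; simp at h
  | cons c cs ih =>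
    intro y0 prev hmem Hprev idx hidx
    have hc : c ∈ tl := hmem c (List.mem_cons_self ..)
    have Gv : GoodB Sl [] (y0 ++ [c]) (theNxt Sl tl prev c) :=
      goodB_init_step Sl tl y0 c hc prev Hprev
    cases idx with
    | zero =>
      exact ⟨theNxt Sl tl prev c, by simp [bInitRow], by simpa using Gv⟩
    | succ idx' =>
      obtain ⟨r, hr, hG⟩ := ih (y0 ++ [c]) (theNxt Sl tl prev c)
        (fun c' hc' => hmem c' (List.mem_cons_of_mem _ hc')) Gv idx' (by simpa using hidx)
      refine ⟨r, by simpa [bInitRow] using hr, ?_⟩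
      have : (y0 ++ [c]) ++ cs.take (idx'+1) = y0 ++ (c :: cs).take (idx'+1+1) := by
        simp [List.take_succ_cons]
      rwa [this] at hG

theorem bStepGo_inv (Sl tl : List Char) (cx : Char) (hcx : cx ∈ tl) :
    ∀ (cs : List Char) (olds : List Int) (x y0 : List Char) (prev : Int),
      (∀ c ∈ cs, c ∈ tl) →
      olds.length = cs.length →
      (∀ idx : Nat, idx < cs.length →
        ∃ o, olds[idx]? = some o ∧ GoodB Sl x (y0 ++ cs.take (idx+1)) o) →
      GoodB Sl (x ++ [cx]) y0 prev →
      ∀ idx : Nat, idx < cs.length →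
        ∃ r, (bStepGo (theNxt Sl tl) cx prev (cs.zip olds))[idx]? = some r ∧
          GoodB Sl (x ++ [cx]) (y0 ++ cs.take (idx+1)) r := by
  intro cs
  induction cs with
  | nil => intro olds x y0 prev _ _ _ _ idx h; simp at h
  | cons c cs ih =>
    intro olds x y0 prev hmem hlen holds Hprev idx hidx
    rcases olds with _ | ⟨o, olds'⟩
    · simp at hlen
    have hc : c ∈ tl := hmem c (List.mem_cons_self ..)
    obtain ⟨o0, ho0, hGo0⟩ := holds 0 (by simp only [List.length_cons]; omega)
    have ho0' : o = o0 := by simpa using ho0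
    rw [← ho0'] at hGo0
    have hGo0' : GoodB Sl x (y0 ++ [c]) o := by simpa using hGo0
    have Gv : GoodB Sl (x ++ [cx]) (y0 ++ [c])
        (min (theNxt Sl tl o cx) (theNxt Sl tl prev c)) :=
      goodB_step_min Sl tl x y0 cx c hcx hc o prev hGo0' Hprev
    cases idx with
    | zero =>
      exact ⟨min (theNxt Sl tl o cx) (theNxt Sl tl prev c), by simp [bStepGo],
        by simpa using Gv⟩
    | succ idx' =>
      obtain ⟨r, hr, hG⟩ := ih olds' (x) (y0 ++ [c])
        (min (theNxt Sl tl o cx) (theNxt Sl tl prev c))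
        (fun c' hc' => hmem c' (List.mem_cons_of_mem _ hc'))
        (by simpa using hlen)
        (by
          intro idx hidx'
          obtain ⟨o', ho', hGo'⟩ := holds (idx+1) (by simp only [List.length_cons]; omega)
          refine ⟨o', by simpa using ho', ?_⟩
          have : y0 ++ (c :: cs).take (idx+1+1) = (y0 ++ [c]) ++ cs.take (idx+1) := by
            simp [List.take_succ_cons]
          rwa [this] at hGo')
        Gv idx' (by simpa using hidx)
      refine ⟨r, by simpa [bStepGo] using hr, ?_⟩
      have : (y0 ++ [c]) ++ cs.take (idx'+1) = y0 ++ (c :: cs).take (idx'+1+1) := by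
        simp [List.take_succ_cons]
      rwa [this] at hG

-- invariant over the fold of t1's characters
theorem bRow_inv (Sl tl t2 : List Char) (h2 : ∀ c ∈ t2, c ∈ tl) :
    ∀ (xs x : List Char) (row : List Int),
      (∀ c ∈ xs, c ∈ tl) →
      row.length = t2.length + 1 →
      (∀ b : Nat, b ≤ t2.length → ∃ r, row[b]? = some r ∧ GoodB Sl x (t2.take b) r) →
      (xs.foldl (fun r c => bStepRow (theNxt Sl tl) t2 c r) row).length = t2.length + 1 ∧
      ∀ b : Nat, b ≤ t2.length →
        ∃ r, (xs.foldl (fun r c => bStepRow (theNxt Sl tl) t2 c r) row)[b]? = some r ∧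
          GoodB Sl (x ++ xs) (t2.take b) r := by
  intro xs
  induction xs with
  | nil => intro x row _ hlen H; simpa using ⟨hlen, H⟩
  | cons c xs ih =>
    intro x row hmem hlen H
    have hc : c ∈ tl := hmem c (List.mem_cons_self ..)
    rcases row with _ | ⟨r0, rest⟩
    · simp at hlen
    have hrest : rest.length = t2.length := by simpa using hlen
    obtain ⟨r0', hr0', hG0⟩ := H 0 (by omega)
    have he0 : r0 = r0' := by simpa using hr0'
    rw [← he0] at hG0
    have hG0' : GoodB Sl x [] r0 := by simpa using hG0
    set h := theNxt Sl tl r0 c with hh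
    have hGh : GoodB Sl (x ++ [c]) [] h := goodB_step0 Sl tl x c hc r0 hG0'
    have hstep : bStepRow (theNxt Sl tl) t2 c (r0 :: rest)
        = h :: bStepGo (theNxt Sl tl) c h (t2.zip rest) := rfl
    have hlen' : (bStepRow (theNxt Sl tl) t2 c (r0 :: rest)).length = t2.length + 1 := by
      rw [hstep]
      simp [bStepGo_length, List.length_zip, hrest]
    have hinv' : ∀ b : Nat, b ≤ t2.length →
        ∃ r, (bStepRow (theNxt Sl tl) t2 c (r0 :: rest))[b]? = some r ∧
          GoodB Sl (x ++ [c]) (t2.take b) r := by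
      intro b hb
      cases b with
      | zero => exact ⟨h, by simp [hstep], by simpa using hGh⟩
      | succ b' =>
        obtain ⟨r, hr, hG⟩ := bStepGo_inv Sl tl c hc t2 rest x [] h h2 hrest
          (by
            intro idx hidx
            obtain ⟨o, ho, hGo⟩ := H (idx+1) (by omega)
            exact ⟨o, by simpa using ho, by simpa using hGo⟩)
          hGh b' (by omega)
        exact ⟨r, by simp [hstep, hr], by simpa using hG⟩
    have hfold : (c :: xs).foldl (fun r c => bStepRow (theNxt Sl tl) t2 c r) (r0 :: rest)
        = xs.foldl (fun r c => bStepRow (theNxt Sl tl) t2 c r)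
            (bStepRow (theNxt Sl tl) t2 c (r0 :: rest)) := rfl
    rw [hfold]
    obtain ⟨hl, hinv⟩ := ih (x ++ [c]) _
      (fun c' hc' => hmem c' (List.mem_cons_of_mem _ hc')) hlen' hinv'
    refine ⟨hl, ?_⟩
    intro b hb
    obtain ⟨r, hr, hG⟩ := hinv b hb
    exact ⟨r, hr, by rwa [show x ++ c :: xs = (x ++ [c]) ++ xs by simp] ⟩

-- B's per-split check decides the same predicate
theorem bCheck_iff (Sl tl : List Char) (k : Nat) (_hk1 : 1 ≤ k) (_hk : k ≤ tl.length) :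
    (bCheck (theNxt Sl tl) (Sl.length : Int) tl (k : Int) = true) ↔
      Emb (tl.take k) (tl.drop k) Sl = true := by
  have ht1 : (PySem.List.slice tl none (some (k : Int))) = tl.take k := by
    rw [PySem.List.slice_to_natCast]
  have ht2 : (PySem.List.slice tl (some (k : Int)) none) = tl.drop k := by
    rw [PySem.List.slice_from_natCast]
  simp only [bCheck, ht1, ht2]
  set t1 := tl.take k with hht1
  set t2 := tl.drop k with hht2
  set R0 : List Int := 0 :: bInitRow (theNxt Sl tl) 0 t2 with hR0
  have hG00 : GoodB Sl [] [] 0 := by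
    refine ⟨le_refl _, by omega, ?_⟩
    intro L hL
    rw [emb_nil_nil]
    simp
  have hR0len : R0.length = t2.length + 1 := by
    rw [hR0]; simp [bInitRow_length]
  have hR0inv : ∀ b : Nat, b ≤ t2.length →
      ∃ r, R0[b]? = some r ∧ GoodB Sl [] (t2.take b) r := by
    intro b hb
    cases b with
    | zero => exact ⟨0, rfl, by simpa using hG00⟩
    | succ b' =>
      obtain ⟨r, hr, hG⟩ := bInitRow_inv Sl tl t2 [] 0
        (fun c hc => List.drop_subset k tl hc) hG00 b' (by omega)
      exact ⟨r, by simpa [hR0] using hr, by simpa using hG⟩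
  obtain ⟨hlenF, hinvF⟩ := bRow_inv Sl tl t2 (fun c hc => List.drop_subset k tl hc)
    t1 [] R0 (fun c hc => List.take_subset k tl hc) hR0len hR0inv
  set F := t1.foldl (fun r c => bStepRow (theNxt Sl tl) t2 c r) R0 with hF
  obtain ⟨r, hr, hG⟩ := hinvF t2.length (le_refl _)
  have hGr : GoodB Sl t1 t2 r := by simpa [List.take_length] using hG
  have hFne : F ≠ [] := by
    intro h
    rw [h] at hlenF
    simp at hlenF
  have hlast : PySem.List.pyGetD F (-1) ((Sl.length : Int) + 2) = r := by
    rw [PySem.List.pyGetD_neg_one F _ hFne]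
    have : F.getLast hFne = F[t2.length]'(by omega) := by
      rw [List.getLast_eq_getElem]
      congr 1
      omega
    rw [this]
    have := List.getElem?_eq_getElem (show t2.length < F.length by omega)
    rw [this] at hr
    exact Option.some_inj.mp hr
  rw [hlast]
  obtain ⟨h0, hw, hiff⟩ := hGr
  constructor
  · intro h
    have hrle : r ≤ (Sl.length : Int) := by simpa using h
    have := (hiff Sl.length (le_refl _)).mpr (by omega)
    simpa [List.take_length] using this
  · intro h
    have h' : Emb t1 t2 (Sl.take Sl.length) = true := by
      rwa [List.take_length]
    have := (hiff Sl.length (le_refl _)).mp h'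
    simpa using this

-- ===== outer loops and the main equality =====

theorem bOuter_eq_any (nxt : Int → Char → Int) (m : Int) (tl : List Char) :
    ∀ l : List Int, bOuter nxt m tl l = l.any (bCheck nxt m tl) := by
  intro l
  induction l with
  | nil => rfl
  | cons i rest ih => by_cases h : bCheck nxt m tl i = true <;> simp [bOuter, h, ih]

theorem any_congr_mem' {α : Type} (l : List α) (p q : α → Bool)
    (h : ∀ x ∈ l, p x = q x) : l.any p = l.any q := by
  induction l with
  | nil => rfl
  | cons x l ih =>
    simp only [List.any_cons, h x (List.mem_cons_self ..),
      ih (fun y hy => h y (List.mem_cons_of_mem _ hy))]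

theorem solve_one_main (S t : String) : solve_one S t = solve_one_alt S t := by
  show (if aOuter S.toList t.toList (PySem.List.pyRange 1 ((t.toList.length : Int) + 1) 1)
        then "YES" else "NO")
     = (if bOuter (fun q c => bNxt (bTbl S.toList t.toList ((S.toList.length : Int) + 1))
            (S.toList.length : Int) ((S.toList.length : Int) + 1) q c)
          (S.toList.length : Int) t.toList
          (PySem.List.pyRange 1 ((t.toList.length : Int) + 1) 1)
        then "YES" else "NO")
  rw [aOuter_eq_any, bOuter_eq_any]
  have hany : (PySem.List.pyRange 1 ((t.toList.length : Int) + 1) 1).any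
        (aCheck S.toList t.toList)
      = (PySem.List.pyRange 1 ((t.toList.length : Int) + 1) 1).any
          (bCheck (fun q c => bNxt (bTbl S.toList t.toList ((S.toList.length : Int) + 1))
              (S.toList.length : Int) ((S.toList.length : Int) + 1) q c)
            (S.toList.length : Int) t.toList) := by
    apply any_congr_mem'
    intro i hi
    rw [PySem.List.mem_pyRange_one] at hi
    obtain ⟨k, rfl⟩ : ∃ k : Nat, i = (k : Int) :=
      ⟨i.toNat, (Int.toNat_of_nonneg (by omega)).symm⟩
    have hk1 : 1 ≤ k := by omega
    have hk : k ≤ t.toList.length := by omega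
    have hA := aCheck_iff S.toList t.toList k hk1 hk
    have hB := bCheck_iff S.toList t.toList k hk1 hk
    have hsame : bCheck (theNxt S.toList t.toList) (S.toList.length : Int) t.toList (k : Int)
        = bCheck (fun q c => bNxt (bTbl S.toList t.toList ((S.toList.length : Int) + 1))
            (S.toList.length : Int) ((S.toList.length : Int) + 1) q c)
            (S.toList.length : Int) t.toList (k : Int) := rfl
    rw [← hsame]
    rcases hAB : aCheck S.toList t.toList (k : Int) with _ | _
    · rcases hBB : bCheck (theNxt S.toList t.toList) (S.toList.length : Int) t.toList (k : Int)
        with _ | _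
      · rfl
      · exact absurd (hA.mpr (hB.mp hBB)) (by simp [hAB])
    · exact (hB.mpr (hA.mp hAB)).symm
  rw [hany]

-- ===== VERDICT (by name: the statement is the Claim_ definition above) =====
theorem solve_one_spec : Claim_equal_solve_one := by
  intro S t _
  unfold Spec_solve_one
  exact solve_one_main S t
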